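-- pv_equiv track=rewrite | github.com/elvinsellappan/PortalIQ | backend/on3_client.py | _extract_status_and_date
-- ===== SOURCE A (Python) =====
-- from typing import Any, Dict, List, Optional
--
-- def _extract_status_and_date(lines: List[str]) -> tuple[Optional[str], Optional[str]]:
--     """
--     Look for lines like:
--       'Entered 11/16/2025'
--       'Committed'
--       'Expected'
--     """
--     status = None
--     date = None
--
--     for line in lines:
--         line = line.strip()
--         if line.startswith("Entered "):
--             status = "Entered"
--             date = line.replace("Entered ", "").strip()
--             break
--         if line in ("Committed", "Expected"):
--             # We'll keep last one found if multiple
--             status = line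
--
--     return status, date
-- ===== SOURCE B (Python) =====
-- from typing import List, Optional
--
-- def _extract_status_and_date(lines: List[str]) -> tuple[Optional[str], Optional[str]]:
--     stripped = [ln.strip() for ln in lines]
--     entered = next((ln for ln in stripped if ln.startswith("Entered ")), None)
--     if entered is not None:
--         return "Entered", entered.replace("Entered ", "").strip()
--     for ln in reversed(stripped):
--         if ln in ("Committed", "Expected"):
--             return ln, None
--     return None, None
-- ===== Notes on version B (the rewrite author's own statement) =====
-- stated objective: alternative
-- what changed: Replaces A's single stateful pass (break + last-wins accumulator) by two separate searches: a forward find of the first 'Entered ' line, else a backward scan returning the last 'Committed'/'Expected' line.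
import Mathlib
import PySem

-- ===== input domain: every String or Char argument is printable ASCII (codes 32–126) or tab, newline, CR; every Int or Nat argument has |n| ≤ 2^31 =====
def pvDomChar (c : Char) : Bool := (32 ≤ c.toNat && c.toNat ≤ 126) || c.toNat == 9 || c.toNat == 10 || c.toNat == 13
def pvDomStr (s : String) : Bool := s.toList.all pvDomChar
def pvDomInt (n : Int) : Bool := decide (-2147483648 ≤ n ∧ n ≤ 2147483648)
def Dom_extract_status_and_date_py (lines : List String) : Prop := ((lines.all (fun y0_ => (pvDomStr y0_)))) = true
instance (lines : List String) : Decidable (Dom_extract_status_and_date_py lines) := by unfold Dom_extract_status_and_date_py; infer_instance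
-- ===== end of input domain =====

-- B replaces A's single stateful scan by two separate searches (forward find of the first
-- 'Entered ' line, else backward scan for the last 'Committed'/'Expected'); alternative decomposition, same cost.


-- ===== PORT A =====
-- loop over `lines` with the `status` accumulator; `break` on the first 'Entered ' line
def extractGoA : List String → Option String → Option String × Option String
  | [], status => (status, none)
  | l :: rest, status =>
    let line := PySem.Str.strip l
    if PySem.Str.startswith line "Entered " then
      (some "Entered", some (PySem.Str.strip (PySem.Str.replace line "Entered " "")))
    else if line == "Committed" || line == "Expected" then
      extractGoA rest (some line)
    else
      extractGoA rest status

def extract_status_and_date_py (lines : List String) : Option String × Option String :=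
  extractGoA lines none

-- ===== PORT B =====
def extract_status_and_date_py_alt (lines : List String) : Option String × Option String :=
  let stripped := lines.map PySem.Str.strip
  match stripped.find? (fun ln => PySem.Str.startswith ln "Entered ") with
  | some ent => (some "Entered", some (PySem.Str.strip (PySem.Str.replace ent "Entered " "")))
  | none =>
    match stripped.reverse.find? (fun ln => ln == "Committed" || ln == "Expected") with
    | some s => (some s, none)
    | none => (none, none)

-- ===== PRECONDITION & SPEC =====
def Spec_extract_status_and_date_py (lines : List String) (out : Option String × Option String) : Prop := out = extract_status_and_date_py_alt lines
instance (lines : List String) (out : Option String × Option String) : Decidable (Spec_extract_status_and_date_py lines out) := by unfold Spec_extract_status_and_date_py; infer_instance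

-- ===== CLAIM (what is proved, stated in full; the proofs are below) =====
def Claim_equal_extract_status_and_date_py : Prop := ∀ (lines : List String), Dom_extract_status_and_date_py lines → Spec_extract_status_and_date_py lines (extract_status_and_date_py lines)

-- ===== LEMMAS AND PROOFS =====

-- A's loop, for any accumulator value, equals B's two-search decomposition (with the
-- accumulator as the fallback when no line matches at all).
theorem extractGoA_eq (lines : List String) (status : Option String) :
    extractGoA lines status =
      match (lines.map PySem.Str.strip).find? (fun ln => PySem.Str.startswith ln "Entered ") with
      | some ent => (some "Entered", some (PySem.Str.strip (PySem.Str.replace ent "Entered " "")))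
      | none =>
        match (lines.map PySem.Str.strip).reverse.find? (fun ln => ln == "Committed" || ln == "Expected") with
        | some s => (some s, none)
        | none => (status, none) := by
  induction lines generalizing status with
  | nil => simp [extractGoA]
  | cons l rest ih =>
    simp only [List.map_cons, List.reverse_cons, List.find?_cons, List.find?_append]
    by_cases hE : PySem.Str.startswith (PySem.Str.strip l) "Entered " = true
    · simp only [extractGoA, hE, if_true]
    · simp only [extractGoA, hE, Bool.false_eq_true, if_false]
      by_cases hC : (PySem.Str.strip l == "Committed" || PySem.Str.strip l == "Expected") = true
      · simp only [hC, if_true]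
        rw [ih]
        cases hf : (rest.map PySem.Str.strip).find? (fun ln => PySem.Str.startswith ln "Entered ") with
        | some ent => rfl
        | none =>
          cases hr : (rest.map PySem.Str.strip).reverse.find? (fun ln => ln == "Committed" || ln == "Expected") with
          | some s => simp only [Option.some_or]
          | none => simp only [Option.none_or]
      · simp only [hC, Bool.false_eq_true, if_false]
        rw [ih]
        cases hf : (rest.map PySem.Str.strip).find? (fun ln => PySem.Str.startswith ln "Entered ") with
        | some ent => rfl
        | none =>
          cases hr : (rest.map PySem.Str.strip).reverse.find? (fun ln => ln == "Committed" || ln == "Expected") with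
          | some s => simp only [Option.some_or]
          | none => simp only [Option.none_or, List.find?_nil]

-- ===== VERDICT (by name: the statement is the Claim_ definition above) =====
theorem extract_status_and_date_py_spec : Claim_equal_extract_status_and_date_py := by
  intro lines _
  unfold Spec_extract_status_and_date_py extract_status_and_date_py extract_status_and_date_py_alt
  rw [extractGoA_eq]
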